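-- pv_equiv track=rewrite | github.com/danielpro432/Pydhikka | TemoaMails.py | _format_inbox_items
-- ===== SOURCE A (Python) =====
-- def _format_inbox_items(provider_name, raw_items):
--     out = []
--     if not raw_items:
--         return out
--     if provider_name == "mailtm":
--         for r in raw_items:
--             out.append({"id": r.get("id"), "from": r.get("from"), "subject": r.get("subject")})
--     elif provider_name == "1secmail":
--         for r in raw_items:
--             out.append({"id": r.get("id"), "from": r.get("from"), "subject": r.get("subject")})
--     elif provider_name == "getnada":
--         for r in raw_items:
--             out.append({"id": r.get("uid") or r.get("id"), "from": r.get("f") or r.get("from"), "subject": r.get("s") or r.get("subject")})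
--     elif provider_name == "maildrop":
--         for r in raw_items:
--             out.append({"id": r.get("id"), "from": r.get("mailfrom") or r.get("headerfrom"), "subject": r.get("subject")})
--     elif provider_name == "mailsac":
--         for r in raw_items:
--             out.append({"id": r.get("_id") or r.get("id") or r.get("msgid"), "from": r.get("from"), "subject": r.get("subject") or r.get("sub")})
--     else:
--         # try generic
--         for r in raw_items:
--             out.append({"id": r.get("id") or r.get("uid") or r.get("_id"), "from": r.get("from") or r.get("f"), "subject": r.get("subject") or r.get("s")})
--     return out
-- ===== SOURCE B (Python) =====
-- _BASE = {"id": ("id",), "from": ("from",), "subject": ("subject",)}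
-- _SPECS = {
--     "mailtm": _BASE,
--     "1secmail": _BASE,
--     "getnada": {"id": ("uid", "id"), "from": ("f", "from"), "subject": ("s", "subject")},
--     "maildrop": {"id": ("id",), "from": ("mailfrom", "headerfrom"), "subject": ("subject",)},
--     "mailsac": {"id": ("_id", "id", "msgid"), "from": ("from",), "subject": ("subject", "sub")},
-- }
-- _GENERIC = {"id": ("id", "uid", "_id"), "from": ("from", "f"), "subject": ("subject", "s")}
--
--
-- def _pick(r, keys):
--     # first truthy r.get(k), else the value of the last candidate (== the `or` chain)
--     return next((v for v in (r.get(k) for k in keys) if v), r.get(keys[-1]))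
--
--
-- def _format_inbox_items(provider_name, raw_items):
--     if not raw_items:
--         return []
--     spec = _SPECS.get(provider_name, _GENERIC)
--     # columnar: one pass per output field, building whole columns ...
--     cols = [(field, [_pick(r, keys) for r in raw_items]) for field, keys in spec.items()]
--     # ... then transpose the columns into row dicts
--     return [{field: vals[i] for field, vals in cols} for i in range(len(raw_items))]
-- ===== Notes on version B (the rewrite author's own statement) =====
-- stated objective: alternative
-- what changed: Replaced the five copy-pasted row-wise per-provider loops with a columnar algorithm: a provider->field-spec table is looked up once, each output field's whole column is built in its own pass over the records, and the rows are then assembled by transposing the columns by index.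
import Mathlib
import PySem

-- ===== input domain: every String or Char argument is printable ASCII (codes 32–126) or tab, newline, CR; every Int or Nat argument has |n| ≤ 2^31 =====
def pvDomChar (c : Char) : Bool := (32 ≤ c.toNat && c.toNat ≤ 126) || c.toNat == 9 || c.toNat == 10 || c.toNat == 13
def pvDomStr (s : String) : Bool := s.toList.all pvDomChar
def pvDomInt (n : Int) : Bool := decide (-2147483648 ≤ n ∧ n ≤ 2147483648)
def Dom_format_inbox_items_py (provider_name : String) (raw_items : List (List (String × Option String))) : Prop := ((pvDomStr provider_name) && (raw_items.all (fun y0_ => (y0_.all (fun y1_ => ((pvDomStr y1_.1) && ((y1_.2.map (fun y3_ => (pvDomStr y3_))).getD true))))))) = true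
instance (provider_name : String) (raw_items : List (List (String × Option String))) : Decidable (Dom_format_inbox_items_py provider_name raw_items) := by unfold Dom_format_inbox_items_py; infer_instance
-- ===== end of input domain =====

-- B replaces the five row-wise per-provider loops by a spec table plus a columnar pass per
-- output field, transposed into rows by index (objective: alternative algorithm, same cost).


-- ===== PORT A =====
-- r.get(k) on a dict of Optional[str] values: first match in the association list, else None (exact)
def pvGet (r : List (String × Option String)) (k : String) : Option String :=
  match r with
  | [] => none
  | (k', v) :: rest => if k' == k then v else pvGet rest k

-- Python truthiness of an Optional[str]: non-None and non-empty (exact on this value type)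
def pvTruthy (v : Option String) : Bool :=
  match v with
  | none => false
  | some s => !(s == "")

-- `a or b` on Optional[str] values (short-circuit: a if truthy, else b) (exact)
def pvOr (a b : Option String) : Option String := if pvTruthy a then a else b

def format_inbox_items_py (provider_name : String) (raw_items : List (List (String × Option String))) : List (List (String × Option String)) :=
  if raw_items.isEmpty then []
  else if provider_name == "mailtm" then
    raw_items.map (fun r => [("id", pvGet r "id"), ("from", pvGet r "from"), ("subject", pvGet r "subject")])
  else if provider_name == "1secmail" then
    raw_items.map (fun r => [("id", pvGet r "id"), ("from", pvGet r "from"), ("subject", pvGet r "subject")])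
  else if provider_name == "getnada" then
    raw_items.map (fun r => [("id", pvOr (pvGet r "uid") (pvGet r "id")), ("from", pvOr (pvGet r "f") (pvGet r "from")), ("subject", pvOr (pvGet r "s") (pvGet r "subject"))])
  else if provider_name == "maildrop" then
    raw_items.map (fun r => [("id", pvGet r "id"), ("from", pvOr (pvGet r "mailfrom") (pvGet r "headerfrom")), ("subject", pvGet r "subject")])
  else if provider_name == "mailsac" then
    raw_items.map (fun r => [("id", pvOr (pvGet r "_id") (pvOr (pvGet r "id") (pvGet r "msgid"))), ("from", pvGet r "from"), ("subject", pvOr (pvGet r "subject") (pvGet r "sub"))])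
  else
    raw_items.map (fun r => [("id", pvOr (pvGet r "id") (pvOr (pvGet r "uid") (pvGet r "_id"))), ("from", pvOr (pvGet r "from") (pvGet r "f")), ("subject", pvOr (pvGet r "subject") (pvGet r "s"))])

-- ===== PORT B =====
def pvBASE : List (String × List String) := [("id", ["id"]), ("from", ["from"]), ("subject", ["subject"])]
def pvSPECS : List (String × List (String × List String)) :=
  [("mailtm", pvBASE),
   ("1secmail", pvBASE),
   ("getnada", [("id", ["uid", "id"]), ("from", ["f", "from"]), ("subject", ["s", "subject"])]),
   ("maildrop", [("id", ["id"]), ("from", ["mailfrom", "headerfrom"]), ("subject", ["subject"])]),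
   ("mailsac", [("id", ["_id", "id", "msgid"]), ("from", ["from"]), ("subject", ["subject", "sub"])])]
def pvGENERIC : List (String × List String) :=
  [("id", ["id", "uid", "_id"]), ("from", ["from", "f"]), ("subject", ["subject", "s"])]

-- _SPECS.get(provider_name, _GENERIC): first-match association lookup with default
def pvSpecsGetD (xs : List (String × List (String × List String))) (p : String)
    (dflt : List (String × List String)) : List (String × List String) :=
  match xs with
  | [] => dflt
  | (k, v) :: rest => if k == p then v else pvSpecsGetD rest p dflt

-- _pick: next((v for v in (r.get(k) for k in keys) if v), r.get(keys[-1]))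
-- first truthy candidate value, else the last candidate's get (keys are nonempty in every spec,
-- so keys[-1] never raises; getLastD's default is unreachable)
def pvPick (r : List (String × Option String)) (keys : List String) : Option String :=
  ((keys.map (pvGet r)).find? pvTruthy).getD (pvGet r (keys.getLastD ""))

def format_inbox_items_py_alt (provider_name : String) (raw_items : List (List (String × Option String))) : List (List (String × Option String)) :=
  if raw_items.isEmpty then []
  else
    let spec := pvSpecsGetD pvSPECS provider_name pvGENERIC
    let cols := spec.map (fun fk => (fk.1, raw_items.map (fun r => pvPick r fk.2)))
    (List.range raw_items.length).map (fun i => cols.map (fun c => (c.1, c.2.getD i none)))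

-- ===== PRECONDITION & SPEC =====
def Spec_format_inbox_items_py (provider_name : String) (raw_items : List (List (String × Option String))) (out : List (List (String × Option String))) : Prop := out = format_inbox_items_py_alt provider_name raw_items
instance (provider_name : String) (raw_items : List (List (String × Option String))) (out : List (List (String × Option String))) : Decidable (Spec_format_inbox_items_py provider_name raw_items out) := by unfold Spec_format_inbox_items_py; infer_instance

-- ===== CLAIM (what is proved, stated in full; the proofs are below) =====
def Claim_equal_format_inbox_items_py : Prop := ∀ (provider_name : String) (raw_items : List (List (String × Option String))), Dom_format_inbox_items_py provider_name raw_items → Spec_format_inbox_items_py provider_name raw_items (format_inbox_items_py provider_name raw_items)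

-- ===== LEMMAS AND PROOFS =====

-- pvPick over an explicit candidate list is the corresponding short-circuit or-chain
theorem pvPick_one (r : List (String × Option String)) (k : String) :
    pvPick r [k] = pvGet r k := by
  unfold pvPick
  simp
  cases h : pvTruthy (pvGet r k) <;> simp [*]

theorem pvPick_two (r : List (String × Option String)) (k1 k2 : String) :
    pvPick r [k1, k2] = pvOr (pvGet r k1) (pvGet r k2) := by
  unfold pvPick pvOr
  simp
  cases h1 : pvTruthy (pvGet r k1) <;> cases h2 : pvTruthy (pvGet r k2) <;> simp [*]

theorem pvPick_three (r : List (String × Option String)) (k1 k2 k3 : String) :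
    pvPick r [k1, k2, k3] = pvOr (pvGet r k1) (pvOr (pvGet r k2) (pvGet r k3)) := by
  unfold pvPick pvOr
  simp
  cases h1 : pvTruthy (pvGet r k1) <;> cases h2 : pvTruthy (pvGet r k2) <;>
    cases h3 : pvTruthy (pvGet r k3) <;> simp [*]

-- transposing three columns built by map gives back the row-wise map
theorem transpose3 (rs : List (List (String × Option String)))
    (a b c : String) (e1 e2 e3 : List (String × Option String) → Option String) :
    (List.range rs.length).map (fun i =>
        [(a, (rs.map e1).getD i none), (b, (rs.map e2).getD i none), (c, (rs.map e3).getD i none)])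
      = rs.map (fun r => [(a, e1 r), (b, e2 r), (c, e3 r)]) := by
  apply List.ext_getElem
  · simp
  · intro i h1 h2
    simp only [List.getElem_map, List.getElem_range]
    have hi : i < rs.length := by simpa using h1
    simp [List.getD, hi]

-- ===== VERDICT (by name: the statement is the Claim_ definition above) =====
theorem format_inbox_items_py_spec : Claim_equal_format_inbox_items_py := by
  intro p rs _
  unfold Spec_format_inbox_items_py format_inbox_items_py format_inbox_items_py_alt
  by_cases he : rs.isEmpty
  · simp [he]
  simp only [he]
  by_cases h1 : p = "mailtm"
  · subst h1
    simp only [pvSpecsGetD, pvSPECS, pvBASE, List.map, beq_self_eq_true, if_true]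
    rw [← transpose3]; simp only [pvPick_one]
  by_cases h2 : p = "1secmail"
  · subst h2
    simp only [pvSpecsGetD, pvSPECS, pvBASE, List.map, String.reduceBEq, Bool.false_eq_true, if_false, reduceIte]
    rw [← transpose3]; simp only [pvPick_one]
  by_cases h3 : p = "getnada"
  · subst h3
    simp only [pvSpecsGetD, pvSPECS, pvBASE, List.map, String.reduceBEq, Bool.false_eq_true, if_false, reduceIte]
    rw [← transpose3]; simp only [pvPick_two]
  by_cases h4 : p = "maildrop"
  · subst h4
    simp only [pvSpecsGetD, pvSPECS, pvBASE, List.map, String.reduceBEq, Bool.false_eq_true, if_false, reduceIte]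
    rw [← transpose3]; simp only [pvPick_one, pvPick_two]
  by_cases h5 : p = "mailsac"
  · subst h5
    simp only [pvSpecsGetD, pvSPECS, pvBASE, List.map, String.reduceBEq, Bool.false_eq_true, if_false, reduceIte]
    rw [← transpose3]; simp only [pvPick_one, pvPick_two, pvPick_three]
  · have e1 : (p == "mailtm") = false := by simp [h1]
    have e2 : (p == "1secmail") = false := by simp [h2]
    have e3 : (p == "getnada") = false := by simp [h3]
    have e4 : (p == "maildrop") = false := by simp [h4]
    have e5 : (p == "mailsac") = false := by simp [h5]
    have f1 : ("mailtm" == p) = false := by simp [Ne.symm h1]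
    have f2 : ("1secmail" == p) = false := by simp [Ne.symm h2]
    have f3 : ("getnada" == p) = false := by simp [Ne.symm h3]
    have f4 : ("maildrop" == p) = false := by simp [Ne.symm h4]
    have f5 : ("mailsac" == p) = false := by simp [Ne.symm h5]
    simp only [pvSpecsGetD, pvSPECS, pvGENERIC, pvBASE, List.map, e1, e2, e3, e4, e5, f1, f2, f3, f4, f5,
      if_false, Bool.false_eq_true]
    rw [← transpose3]; simp only [pvPick_two, pvPick_three]
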